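-- pv_equiv track=rewrite | github.com/pay-me-for-the-lab/AOIS-2023-1sem | LAB3/main.py | remove_extra_characters
-- ===== SOURCE A (Python) =====
-- def remove_extra_characters(formula):
--     for_delete = ['(', ')', '+', '*']
--     answer = [[]]
--     formula = [i * (not (i == ')+(' or i == ')*(')) or ' ' for i in formula.split() if i not in for_delete]
--     space_i = 0
--     for i in formula:
--         if i == ' ':
--             answer.append([])
--             space_i += 1
--         else:
--             answer[space_i].append(i)
--     return answer
-- ===== SOURCE B (Python) =====
-- def remove_extra_characters(formula):
--     toks = [t for t in formula.split() if t not in ('(', ')', '+', '*')]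
--     cuts = [i for i, t in enumerate(toks) if t in (')+(', ')*(')]
--     bounds = [-1] + cuts + [len(toks)]
--     return [toks[lo + 1:hi] for lo, hi in zip(bounds, bounds[1:])]
-- ===== Notes on version B (the rewrite author's own statement) =====
-- stated objective: alternative
-- what changed: Replaces A's streaming state machine (a comprehension rewriting delimiter tokens to ' ' markers, then a loop that grows answer and appends to the group at a running index) with index arithmetic: collect the marker positions once with enumerate, form the boundary list [-1]+cuts+[len], and build every group by slicing the token list between consecutive boundaries.
import Mathlib
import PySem

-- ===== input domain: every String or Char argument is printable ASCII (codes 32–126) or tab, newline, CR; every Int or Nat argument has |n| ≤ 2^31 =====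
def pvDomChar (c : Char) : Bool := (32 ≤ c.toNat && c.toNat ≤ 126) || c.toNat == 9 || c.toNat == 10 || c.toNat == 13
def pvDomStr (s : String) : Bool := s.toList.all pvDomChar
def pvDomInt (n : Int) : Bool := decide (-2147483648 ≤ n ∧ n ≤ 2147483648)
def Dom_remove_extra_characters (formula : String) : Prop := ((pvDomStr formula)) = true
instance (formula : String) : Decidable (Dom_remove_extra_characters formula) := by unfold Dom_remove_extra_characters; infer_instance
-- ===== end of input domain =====

-- B replaces A's streaming accumulator (marker-rewrite pass + indexed grouping loop) by index
-- arithmetic: collect the marker positions once, then cut the token list into groups by SLICING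
-- between consecutive boundaries — no running group state at all (alternative decomposition, same cost).

-- ===== PORT A =====
-- the comprehension element  i * (not (i == ')+(' or i == ')*(')) or ' '
def reaMark (i : String) : String :=
  let x := if !(i == ")+(" || i == ")*(") then i else ""
  if x = "" then " " else x

-- the loop body over (answer, space_i)
def reaStep (st : List (List String) × Nat) (i : String) : List (List String) × Nat :=
  if i = " " then (st.1 ++ [[]], st.2 + 1)
  else (st.1.modify st.2 (· ++ [i]), st.2)

def remove_extra_characters (formula : String) : List (List String) :=
  let for_delete : List String := ["(", ")", "+", "*"]
  let formula' := ((PySem.Str.split₀ formula).filter (fun i => !(for_delete.contains i))).map reaMark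
  (formula'.foldl reaStep ([[]], 0)).1

-- ===== PORT B =====
def remove_extra_characters_alt (formula : String) : List (List String) :=
  let toks := (PySem.Str.split₀ formula).filter (fun t => !((["(", ")", "+", "*"] : List String).contains t))
  let cuts := ((PySem.List.enumerate toks).filter (fun p => p.2 == ")+(" || p.2 == ")*(")).map (fun p => p.1)
  let bounds := [(-1 : Int)] ++ cuts ++ [(toks.length : Int)]
  (bounds.zip (bounds.drop 1)).map (fun p => PySem.List.slice toks (some (p.1 + 1)) (some p.2))

-- ===== PRECONDITION & SPEC =====
def Spec_remove_extra_characters (formula : String) (out : List (List String)) : Prop := out = remove_extra_characters_alt formula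
instance (formula : String) (out : List (List String)) : Decidable (Spec_remove_extra_characters formula out) := by unfold Spec_remove_extra_characters; infer_instance

-- ===== CLAIM (what is proved, stated in full; the proofs are below) =====
def Claim_equal_remove_extra_characters : Prop := ∀ (formula : String), Dom_remove_extra_characters formula → Spec_remove_extra_characters formula (remove_extra_characters formula)

-- ===== LEMMAS AND PROOFS =====

-- Proof-only reference function: the grouping both programs compute, as structural recursion.
def sg : List String → List (List String)
  | [] => [[]]
  | t :: rest =>
    if t == ")+(" || t == ")*(" then [] :: sg rest
    else
      match sg rest with
      | [] => [[t]]
      | g :: gs => (t :: g) :: gs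

lemma sg_ne_nil (toks : List String) : sg toks ≠ [] := by
  cases toks with
  | nil => simp [sg]
  | cons t rest =>
    unfold sg
    split_ifs with h
    · simp
    · cases hr : sg rest <;> simp

-- ---------- A-side ----------

-- every word produced by split().go is nonempty and contains no whitespace character
lemma split₀_go_sound (s cur : List Char) (acc : List (List Char))
    (hcur : ∀ c ∈ cur, PySem.Chars.isspace c = false)
    (hacc : ∀ w ∈ acc, w ≠ ([] : List Char) ∧ ∀ c ∈ w, PySem.Chars.isspace c = false) :
    ∀ w ∈ PySem.Chars.split₀.go s cur acc, w ≠ ([] : List Char) ∧ ∀ c ∈ w, PySem.Chars.isspace c = false := by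
  induction s generalizing cur acc with
  | nil =>
    intro w hw
    unfold PySem.Chars.split₀.go at hw
    by_cases h : cur.isEmpty = true
    · simp only [h, if_pos] at hw
      exact hacc w (by simpa using hw)
    · simp [h] at hw
      rcases hw with h1 | h1
      · exact hacc w h1
      · subst h1
        refine ⟨by simpa [List.isEmpty_iff] using h, ?_⟩
        intro c hc
        exact hcur c (by simpa using hc)
  | cons c rest ih =>
    intro w hw
    unfold PySem.Chars.split₀.go at hw
    by_cases hs : PySem.Chars.isspace c = true
    · by_cases he : cur.isEmpty = true
      · simp only [hs, he, if_pos] at hw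
        exact ih [] acc (by simp) hacc w hw
      · simp only [hs, he, if_pos] at hw
        refine ih [] (cur.reverse :: acc) (by simp) ?_ w hw
        intro v hv
        rcases List.mem_cons.mp hv with hv1 | hv1
        · subst hv1
          refine ⟨by simpa [List.isEmpty_iff] using he, ?_⟩
          intro d hd
          exact hcur d (by simpa using hd)
        · exact hacc v hv1
    · simp only [hs, if_neg, Bool.false_eq_true, not_false_eq_true] at hw
      refine ih (c :: cur) acc ?_ hacc w hw
      intro d hd
      rcases List.mem_cons.mp hd with hd1 | hd1
      · subst hd1; simpa using hs
      · exact hcur d hd1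

lemma split₀_tokens (formula : String) :
    ∀ t ∈ PySem.Str.split₀ formula, t ≠ "" ∧ t ≠ " " := by
  intro t ht
  simp only [PySem.Str.split₀, List.mem_map] at ht
  obtain ⟨w, hw, rfl⟩ := ht
  have h := split₀_go_sound formula.toList [] [] (by simp) (by simp) w
    (by simpa [PySem.Chars.split₀] using hw)
  constructor
  · intro hcon
    apply h.1
    have : (String.ofList w).toList = ("" : String).toList := by rw [hcon]
    simpa using this
  · intro hcon
    have : (String.ofList w).toList = (" " : String).toList := by rw [hcon]
    have hw' : w = [' '] := by simpa using this
    have := h.2 ' ' (by simp [hw'])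
    simp [PySem.Chars.isspace] at this

-- appending to the last group
def appendLast (answer : List (List String)) (tok : String) : List (List String) :=
  match answer with
  | [] => []
  | [g] => [g ++ [tok]]
  | g :: gs => g :: appendLast gs tok

lemma modify_last_eq_appendLast (ans : List (List String)) (h : ans ≠ []) (t : String) :
    ans.modify (ans.length - 1) (· ++ [t]) = appendLast ans t := by
  induction ans with
  | nil => exact absurd rfl h
  | cons g gs ih =>
    cases gs with
    | nil => simp [appendLast, List.modify]
    | cons g' gs' =>
      have hstep : (g :: g' :: gs').modify ((g :: g' :: gs').length - 1) (· ++ [t])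
          = g :: (g' :: gs').modify ((g' :: gs').length - 1) (· ++ [t]) := by
        have hlen : (g :: g' :: gs').length - 1 = ((g' :: gs').length - 1) + 1 := by simp
        rw [hlen]; rfl
      rw [hstep, ih (by simp)]
      rfl

lemma appendLast_ne_nil (ans : List (List String)) (h : ans ≠ []) (t : String) :
    appendLast ans t ≠ [] := by
  rw [← modify_last_eq_appendLast ans h t]
  simpa [List.modify_eq_nil_iff] using h

lemma appendLast_length (ans : List (List String)) (h : ans ≠ []) (t : String) :
    (appendLast ans t).length = ans.length := by
  rw [← modify_last_eq_appendLast ans h t]; simp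

lemma appendLast_dropLast (ans : List (List String)) (h : ans ≠ []) (t : String) :
    (appendLast ans t).dropLast = ans.dropLast := by
  induction ans with
  | nil => exact absurd rfl h
  | cons g gs ih =>
    cases gs with
    | nil => simp [appendLast]
    | cons g' gs' =>
      have := ih (by simp)
      simp only [appendLast] at *
      rw [List.dropLast_cons_of_ne_nil (appendLast_ne_nil (g' :: gs') (by simp) t),
          List.dropLast_cons_of_ne_nil (by simp)]
      simpa using this

lemma appendLast_getLastD (ans : List (List String)) (h : ans ≠ []) (t : String) :
    (appendLast ans t).getLast?.getD [] = ans.getLast?.getD [] ++ [t] := by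
  induction ans with
  | nil => exact absurd rfl h
  | cons g gs ih =>
    cases gs with
    | nil => simp [appendLast]
    | cons g' gs' =>
      have := ih (by simp)
      simp only [appendLast] at *
      rw [List.getLast?_cons_cons]
      cases hA : appendLast (g' :: gs') t with
      | nil => exact absurd hA (appendLast_ne_nil (g' :: gs') (by simp) t)
      | cons a as =>
        rw [hA] at this
        rw [List.getLast?_cons_cons]
        exact this

-- merge a pending last group with the head of the remaining grouping
def mergeFirst (g : List String) : List (List String) → List (List String)
  | [] => [g]
  | h :: hs => (g ++ h) :: hs

-- the loop invariant of A's second loop against the reference grouping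
lemma foldA_eq (toks : List String) :
    ∀ ans : List (List String), ans ≠ [] →
    (∀ t ∈ toks, t ≠ "" ∧ t ≠ " ") →
    ((toks.map reaMark).foldl reaStep (ans, ans.length - 1)).1
      = ans.dropLast ++ mergeFirst (ans.getLast?.getD []) (sg toks) := by
  induction toks with
  | nil =>
    intro ans hans _
    cases hans' : ans.reverse with
    | nil => exact absurd (by simpa using congrArg List.reverse hans') hans
    | cons lastg rev =>
      have : ans = rev.reverse ++ [lastg] := by
        have := congrArg List.reverse hans'
        simpa using this
      subst this
      simp [sg, mergeFirst]
  | cons t rest ih =>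
    intro ans hans htoks
    have ht := htoks t (by simp)
    have hrest : ∀ u ∈ rest, u ≠ "" ∧ u ≠ " " := fun u hu => htoks u (by simp [hu])
    by_cases hmk : (t == ")+(" || t == ")*(") = true
    · -- marker token: opens a new group
      have hmark : reaMark t = " " := by
        unfold reaMark; rw [hmk]; simp
      have ha : reaStep (ans, ans.length - 1) (reaMark t) = (ans ++ [[]], ans.length - 1 + 1) := by
        simp [reaStep, hmark]
      rw [List.map_cons, List.foldl_cons, ha]
      have hlen : ans.length - 1 + 1 = (ans ++ [[]]).length - 1 := by
        have := List.length_pos_iff.mpr hans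
        simp; omega
      rw [hlen, ih (ans ++ [[]]) (by simp) hrest]
      have h1 : (ans ++ [[]]).dropLast = ans := by simp
      have h2 : (ans ++ [[]]).getLast?.getD [] = ([] : List String) := by simp
      rw [h1, h2]
      have hsg : sg (t :: rest) = [] :: sg rest := by
        rw [sg]; simp [hmk]
      rw [hsg]
      cases hr : sg rest with
      | nil => exact absurd hr (sg_ne_nil rest)
      | cons g gs =>
        cases hans' : ans.reverse with
        | nil => exact absurd (by simpa using congrArg List.reverse hans') hans
        | cons lastg rev =>
          have : ans = rev.reverse ++ [lastg] := by
            have := congrArg List.reverse hans'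
            simpa using this
          subst this
          simp [mergeFirst]
    · -- ordinary token
      have hmk' : (t == ")+(" || t == ")*(") = false := by simpa using hmk
      have hmark : reaMark t = t := by
        unfold reaMark; rw [hmk']; simp [ht.1]
      have ha : reaStep (ans, ans.length - 1) (reaMark t)
          = (appendLast ans t, ans.length - 1) := by
        simp [reaStep, hmark, ht.2, modify_last_eq_appendLast ans hans t]
      rw [List.map_cons, List.foldl_cons, ha]
      have hlen : ans.length - 1 = (appendLast ans t).length - 1 := by
        rw [appendLast_length ans hans t]
      rw [hlen, ih (appendLast ans t) (appendLast_ne_nil ans hans t) hrest,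
          appendLast_dropLast ans hans t, appendLast_getLastD ans hans t]
      cases hr : sg rest with
      | nil => exact absurd hr (sg_ne_nil rest)
      | cons g gs =>
        have hsg : sg (t :: rest) = (t :: g) :: gs := by
          rw [sg]; simp [hmk', hr]
        rw [hsg]
        simp [mergeFirst]

lemma A_eq_sg (formula : String) :
    remove_extra_characters formula
      = sg ((PySem.Str.split₀ formula).filter
          (fun t => !((["(", ")", "+", "*"] : List String).contains t))) := by
  unfold remove_extra_characters
  have hf := foldA_eq
    ((PySem.Str.split₀ formula).filter (fun t => !((["(", ")", "+", "*"] : List String).contains t)))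
    [[]] (by simp)
    (fun u hu => split₀_tokens formula u (List.mem_of_mem_filter hu))
  simp only [List.length_cons, List.length_nil] at hf
  rw [hf]
  cases hr : sg ((PySem.Str.split₀ formula).filter
      (fun t => !((["(", ")", "+", "*"] : List String).contains t))) with
  | nil => exact absurd hr (sg_ne_nil _)
  | cons g gs => simp [mergeFirst]

-- ---------- B-side ----------

-- marker positions, computed structurally
def cutsOf : List String → List Int
  | [] => []
  | t :: rest => (if t == ")+(" || t == ")*(" then [(0 : Int)] else []) ++ (cutsOf rest).map (· + 1)

lemma cuts_eq (toks : List String) (s : Int) :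
    ((PySem.List.enumerate toks s).filter (fun p => p.2 == ")+(" || p.2 == ")*(")).map (fun p => p.1)
      = (cutsOf toks).map (· + s) := by
  induction toks generalizing s with
  | nil => simp [cutsOf, PySem.List.enumerate_nil]
  | cons t rest ih =>
    rw [PySem.List.enumerate_cons, List.filter_cons]
    unfold cutsOf
    by_cases hm : (t == ")+(" || t == ")*(") = true
    · simp only [hm, if_pos, List.map_cons, ih (s + 1), List.map_append, List.map_map]
      simp only [List.map_nil, List.singleton_append, List.cons.injEq]
      refine ⟨by omega, ?_⟩
      apply List.map_congr_left
      intro a _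
      simp only [Function.comp_apply]
      omega
    · simp only [hm, Bool.false_eq_true, if_false, ih (s + 1), List.nil_append]
      rw [List.map_map]
      apply List.map_congr_left
      intro a _
      simp only [Function.comp_apply]
      omega

lemma cutsOf_nonneg (toks : List String) : ∀ c ∈ cutsOf toks, 0 ≤ c := by
  induction toks with
  | nil => simp [cutsOf]
  | cons t rest ih =>
    intro c hc
    unfold cutsOf at hc
    rcases List.mem_append.mp hc with h | h
    · split_ifs at h <;> simp at h
      omega
    · obtain ⟨a, ha, rfl⟩ := List.mem_map.mp h
      have := ih a ha
      omega

-- shift lemma for nonnegative slices on a cons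
lemma slice_cons_shift (x : String) (xs : List String) (a b : Int) (ha : 0 ≤ a) (hb : 0 ≤ b) :
    PySem.List.slice (x :: xs) (some (a + 1)) (some (b + 1))
      = PySem.List.slice xs (some a) (some b) := by
  rw [PySem.List.slice_toNat (x :: xs) (by omega) (by omega),
      PySem.List.slice_toNat xs ha hb]
  have h1 : (a + 1).toNat = a.toNat + 1 := by omega
  have h2 : (b + 1).toNat = b.toNat + 1 := by omega
  rw [h1, h2]
  simp only [List.drop_succ_cons]
  congr 1
  omega

lemma slice_cons_head (x : String) (xs : List String) (b : Int) (hb : 0 ≤ b) :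
    PySem.List.slice (x :: xs) (some 0) (some (b + 1))
      = x :: PySem.List.slice xs (some 0) (some b) := by
  rw [PySem.List.slice_toNat (x :: xs) (by omega) (by omega),
      PySem.List.slice_toNat xs le_rfl hb]
  have h2 : (b + 1).toNat = b.toNat + 1 := by omega
  simp [h2]

-- the slicing pipeline on an arbitrary token list (proof-only names for B's slice map)
def cutSlice (toks : List String) (p : Int × Int) : List String :=
  PySem.List.slice toks (some (p.1 + 1)) (some p.2)

def bFun (toks : List String) : List (List String) :=
  (([(-1 : Int)] ++ cutsOf toks ++ [(toks.length : Int)]).zip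
    (([(-1 : Int)] ++ cutsOf toks ++ [(toks.length : Int)]).drop 1)).map (cutSlice toks)

-- consecutive pairs of a shifted bound list are the shifted pairs
lemma zip_tail_map (l : List Int) (f : Int → Int) :
    (l.map f).zip ((l.map f).drop 1) = (l.zip (l.drop 1)).map (fun p => (f p.1, f p.2)) := by
  rw [← List.map_drop, List.zip_map]
  rfl

lemma pairs_cons (a : Int) (M : List Int) (hM : M ≠ []) :
    (a :: M).zip ((a :: M).drop 1) = (a, M.headD 0) :: (M.zip (M.drop 1)) := by
  cases M with
  | nil => exact absurd rfl hM
  | cons m0 M' => rfl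

lemma bFun_eq_sg (toks : List String) : bFun toks = sg toks := by
  induction toks with
  | nil => simp [bFun, cutsOf, cutSlice, sg, PySem.List.slice_toNat]
  | cons t rest ih =>
    have hKpos : ∀ c ∈ (cutsOf rest ++ [(rest.length : Int)]), 0 ≤ c := by
      intro c hc
      rcases List.mem_append.mp hc with h | h
      · exact cutsOf_nonneg rest c h
      · simp at h; omega
    obtain ⟨k0, K', hK⟩ : ∃ k0 K', cutsOf rest ++ [(rest.length : Int)] = k0 :: K' := by
      cases h : cutsOf rest ++ [(rest.length : Int)] with
      | nil => exact absurd h (by simp)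
      | cons a l => exact ⟨a, l, rfl⟩
    have hk0 : 0 ≤ k0 := hKpos k0 (by rw [hK]; simp)
    have hLdrop : ([(-1 : Int)] ++ cutsOf rest ++ [(rest.length : Int)]).drop 1
        = cutsOf rest ++ [(rest.length : Int)] := by simp
    have hpairsmem : ∀ p ∈ ([(-1 : Int)] ++ cutsOf rest ++ [(rest.length : Int)]).zip
        (([(-1 : Int)] ++ cutsOf rest ++ [(rest.length : Int)]).drop 1),
        -1 ≤ p.1 ∧ 0 ≤ p.2 := by
      intro p hp
      obtain ⟨p1, p2⟩ := p
      obtain ⟨h1, h2⟩ := List.of_mem_zip hp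
      constructor
      · simp only [List.append_assoc, List.mem_append, List.mem_singleton] at h1
        rcases h1 with h | h | h
        · omega
        · have := cutsOf_nonneg rest _ h; omega
        · omega
      · rw [hLdrop] at h2
        exact hKpos _ h2
    have hshift : ((([(-1 : Int)] ++ cutsOf rest ++ [(rest.length : Int)]).zip
          (([(-1 : Int)] ++ cutsOf rest ++ [(rest.length : Int)]).drop 1)).map
          (cutSlice (t :: rest) ∘ (fun p => (p.1 + 1, p.2 + 1))))
        = bFun rest := by
      unfold bFun
      apply List.map_congr_left
      intro p hp
      obtain ⟨h1, h2⟩ := hpairsmem p hp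
      simp only [Function.comp_apply, cutSlice]
      exact slice_cons_shift t rest (p.1 + 1) p.2 (by omega) h2
    by_cases hmk : (t == ")+(" || t == ")*(") = true
    · -- marker head: first group is empty, the rest are the shifted groups of rest
      have hcuts : cutsOf (t :: rest) = [(0 : Int)] ++ (cutsOf rest).map (· + 1) := by
        simp only [cutsOf, hmk, if_pos]
      have hb : [(-1 : Int)] ++ cutsOf (t :: rest) ++ [((t :: rest).length : Int)]
          = (-1 : Int) :: (([(-1 : Int)] ++ cutsOf rest ++ [(rest.length : Int)]).map (· + 1)) := by
        rw [hcuts]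
        simp only [List.map_append, List.map_cons, List.map_nil, List.length_cons]
        push_cast
        simp
      have hsg : sg (t :: rest) = [] :: sg rest := by
        rw [sg]; simp [hmk]
      unfold bFun
      rw [hb, hsg, pairs_cons _ _ (by simp), zip_tail_map]
      have hhead : (([(-1 : Int)] ++ cutsOf rest ++ [(rest.length : Int)]).map (· + 1)).headD 0
          = (0 : Int) := by simp
      rw [hhead, List.map_cons, List.map_map]
      congr 1
      rw [hshift, ih]
    · -- ordinary head: it is prepended to the first group of rest
      have hmk' : (t == ")+(" || t == ")*(") = false := by simpa using hmk
      have hcuts : cutsOf (t :: rest) = (cutsOf rest).map (· + 1) := by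
        simp only [cutsOf, hmk', Bool.false_eq_true, if_false, List.nil_append]
      have hb : [(-1 : Int)] ++ cutsOf (t :: rest) ++ [((t :: rest).length : Int)]
          = (-1 : Int) :: ((cutsOf rest ++ [(rest.length : Int)]).map (· + 1)) := by
        rw [hcuts]
        simp only [List.map_append, List.map_cons, List.map_nil, List.length_cons]
        push_cast
        simp
      -- decompose bFun rest the same way
      have hLcons : [(-1 : Int)] ++ cutsOf rest ++ [(rest.length : Int)]
          = (-1 : Int) :: (cutsOf rest ++ [(rest.length : Int)]) := by simp
      have hbrest : bFun rest
          = cutSlice rest (-1, k0)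
            :: ((cutsOf rest ++ [(rest.length : Int)]).zip
                ((cutsOf rest ++ [(rest.length : Int)]).drop 1)).map (cutSlice rest) := by
        unfold bFun
        rw [hLcons, pairs_cons _ _ (by rw [hK]; simp), List.map_cons, hK]
        simp
      have hsgrest := ih
      rw [hbrest] at hsgrest
      cases hr : sg rest with
      | nil => exact absurd hr (sg_ne_nil rest)
      | cons g gs =>
        rw [hr] at hsgrest
        have hg : cutSlice rest (-1, k0) = g := (List.cons_eq_cons.mp hsgrest).1
        have hgs : ((cutsOf rest ++ [(rest.length : Int)]).zip
            ((cutsOf rest ++ [(rest.length : Int)]).drop 1)).map (cutSlice rest) = gs :=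
          (List.cons_eq_cons.mp hsgrest).2
        have hsg : sg (t :: rest) = (t :: g) :: gs := by
          rw [sg]; simp [hmk', hr]
        unfold bFun
        rw [hb, hsg, pairs_cons _ _ (by rw [hK]; simp), zip_tail_map]
        have hhead : ((cutsOf rest ++ [(rest.length : Int)]).map (· + 1)).headD 0 = k0 + 1 := by
          rw [hK]; simp
        rw [hhead, List.map_cons, List.map_map]
        congr 1
        · show PySem.List.slice (t :: rest) (some ((-1 : Int) + 1)) (some (k0 + 1)) = t :: g
          have e : ((-1 : Int) + 1) = 0 := by norm_num
          rw [e, slice_cons_head t rest k0 hk0, ← hg]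
          show _ = t :: PySem.List.slice rest (some ((-1 : Int) + 1)) (some k0)
          rw [e]
        · -- the shifted tail pairs are rest's tail groups
          have hK1 : ((cutsOf rest ++ [(rest.length : Int)]).map (· + 1)).zip
              (((cutsOf rest ++ [(rest.length : Int)]).map (· + 1)).drop 1)
              = ((cutsOf rest ++ [(rest.length : Int)]).zip
                ((cutsOf rest ++ [(rest.length : Int)]).drop 1)).map
                (fun p => (p.1 + 1, p.2 + 1)) := zip_tail_map _ _
          have htailmem : ∀ p ∈ (cutsOf rest ++ [(rest.length : Int)]).zip
              ((cutsOf rest ++ [(rest.length : Int)]).drop 1), 0 ≤ p.1 ∧ 0 ≤ p.2 := by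
            intro p hp
            obtain ⟨p1, p2⟩ := p
            obtain ⟨h1, h2⟩ := List.of_mem_zip hp
            exact ⟨hKpos _ h1, hKpos _ (List.mem_of_mem_drop h2)⟩
          rw [← hgs]
          apply List.map_congr_left
          intro p hp
          obtain ⟨h1, h2⟩ := htailmem p hp
          simp only [Function.comp_apply, cutSlice]
          exact slice_cons_shift t rest (p.1 + 1) p.2 (by omega) h2

-- ===== VERDICT (by name: the statement is the Claim_ definition above) =====
theorem remove_extra_characters_spec : Claim_equal_remove_extra_characters := by
  intro formula _
  unfold Spec_remove_extra_characters
  rw [A_eq_sg]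
  unfold remove_extra_characters_alt
  simp only
  rw [cuts_eq _ 0]
  have : ((cutsOf ((PySem.Str.split₀ formula).filter
      (fun t => !((["(", ")", "+", "*"] : List String).contains t)))).map (· + 0))
      = cutsOf ((PySem.Str.split₀ formula).filter
      (fun t => !((["(", ")", "+", "*"] : List String).contains t))) := by
    simp
  rw [this, ← bFun_eq_sg]
  rfl
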